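-- pv_equiv track=rewrite | github.com/codeiosaur/pdfwiki | src/generate/related.py | citation_suffixes
-- ===== SOURCE A (Python) =====
-- def citation_suffixes(
--     items: list[str],
--     text_to_sources: dict[str, list[str]],
--     source_key_to_note_index: dict[tuple[str, ...], int],
--     start_index: int,
-- ) -> tuple[list[str], list[str], int]:
--     """Append footnote citations to items (used by legacy renderers)."""
--     rendered: list[str] = []
--     notes: list[str] = []
--     next_index = start_index
--
--     if not items:
--         return rendered, notes, next_index
--
--     for item in items:
--         source_ids = text_to_sources.get(item, [])
--         source_key = tuple(source_ids)
--
--         if source_key in source_key_to_note_index: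
--             note_index = source_key_to_note_index[source_key]
--         else:
--             note_index = next_index
--             source_key_to_note_index[source_key] = note_index
--             joined_sources = ", ".join(source_ids) if source_ids else "unknown"
--             notes.append(f"[^{note_index}]: chunk={joined_sources}")
--             next_index += 1
--
--         rendered.append(f"{item} [^{note_index}]")
--
--     return rendered, notes, next_index
-- ===== SOURCE B (Python) =====
-- def citation_suffixes(
--     items: list[str],
--     text_to_sources: dict[str, list[str]],
--     source_key_to_note_index: dict[tuple[str, ...], int],
--     start_index: int,
-- ) -> tuple[list[str], list[str], int]:
--     """Collect the new source keys first, then build notes/rendered by comprehensions."""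
--     if not items:
--         return [], [], start_index
--
--     new_keys: list[tuple[str, ...]] = []
--     for item in items:
--         key = tuple(text_to_sources.get(item, []))
--         if key not in source_key_to_note_index:
--             source_key_to_note_index[key] = start_index + len(new_keys)
--             new_keys.append(key)
--
--     notes = [
--         f"[^{start_index + i}]: chunk={', '.join(key) if key else 'unknown'}"
--         for i, key in enumerate(new_keys)
--     ]
--     rendered = [
--         f"{item} [^{source_key_to_note_index[tuple(text_to_sources.get(item, []))]}]"
--         for item in items
--     ]
--     return rendered, notes, start_index + len(new_keys)
-- ===== Notes on version B (the rewrite author's own statement) =====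
-- stated objective: alternative
-- what changed: Instead of A's single loop threading rendered/notes/next_index, B's loop only collects the list of new source keys (index = start_index + position); notes then come from an enumerate comprehension over that list and rendered from a lookup comprehension over items, with next_index computed as start_index + len(new_keys).
import Mathlib
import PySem

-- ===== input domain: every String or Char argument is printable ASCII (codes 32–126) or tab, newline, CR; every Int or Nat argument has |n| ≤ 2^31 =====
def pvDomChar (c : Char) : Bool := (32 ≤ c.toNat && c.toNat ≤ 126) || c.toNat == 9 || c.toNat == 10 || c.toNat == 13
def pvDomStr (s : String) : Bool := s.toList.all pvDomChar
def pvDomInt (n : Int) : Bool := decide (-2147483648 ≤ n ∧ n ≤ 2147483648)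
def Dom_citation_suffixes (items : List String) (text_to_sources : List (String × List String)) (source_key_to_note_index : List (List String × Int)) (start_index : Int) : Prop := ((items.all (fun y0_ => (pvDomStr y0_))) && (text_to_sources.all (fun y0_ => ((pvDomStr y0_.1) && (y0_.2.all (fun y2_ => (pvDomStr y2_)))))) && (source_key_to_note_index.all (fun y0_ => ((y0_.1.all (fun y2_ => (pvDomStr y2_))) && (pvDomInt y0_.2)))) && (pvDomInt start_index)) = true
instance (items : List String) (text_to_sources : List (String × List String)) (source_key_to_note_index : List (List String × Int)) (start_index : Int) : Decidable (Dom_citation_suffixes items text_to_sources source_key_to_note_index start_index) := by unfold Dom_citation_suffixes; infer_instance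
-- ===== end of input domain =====

-- B replaces A's single loop threading rendered/notes/next_index by: one pass collecting only the
-- NEW source keys (note index = start_index + position), then notes via an enumerate comprehension
-- and rendered via a lookup comprehension. Equal return value is proved; both Pythons mutate
-- source_key_to_note_index identically (side effect not modelled here).

-- shared f-string formatting of both Pythons
def fmtItem (ni : Int) (item : String) : String := item ++ " [^" ++ PySem.Int.toStr ni ++ "]"
def noteLine (ni : Int) (sources : List String) : String :=
  "[^" ++ PySem.Int.toStr ni ++ "]: chunk=" ++
    (if sources.isEmpty then "unknown" else PySem.Str.join ", " sources)

-- ===== PORT A =====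
-- A's single for-loop: state (rendered, notes, dict, next_index)
def loopA (td : PySem.Dict String (List String)) :
    List String → List String × List String × PySem.Dict (List String) Int × Int →
    List String × List String × PySem.Dict (List String) Int × Int
  | [], st => st
  | item :: rest, (rendered, notes, d, next) =>
    let sources := td.getD item []
    match d.get? sources with
    | some ni => loopA td rest (rendered ++ [fmtItem ni item], notes, d, next)
    | none =>
        loopA td rest (rendered ++ [fmtItem next item],
          notes ++ [noteLine next sources], d.insert sources next, next + 1)

def citation_suffixes (items : List String) (text_to_sources : List (String × List String)) (source_key_to_note_index : List (List String × Int)) (start_index : Int) : List String × List String × Int :=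
  if items.isEmpty then ([], [], start_index)
  else
    let st := loopA (PySem.Dict.ofList text_to_sources) items
      ([], [], PySem.Dict.ofList source_key_to_note_index, start_index)
    (st.1, st.2.1, st.2.2.2)

-- ===== PORT B =====
-- B's collection loop: state (new_keys, dict); index of a new key = start + len(new_keys)
def passB (td : PySem.Dict String (List String)) (start : Int) :
    List String → List (List String) × PySem.Dict (List String) Int →
    List (List String) × PySem.Dict (List String) Int
  | [], st => st
  | item :: rest, (nk, d) =>
    let key := td.getD item []
    if d.contains key then passB td start rest (nk, d)
    else passB td start rest (nk ++ [key], d.insert key (start + (nk.length : Int)))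

def citation_suffixes_alt (items : List String) (text_to_sources : List (String × List String)) (source_key_to_note_index : List (List String × Int)) (start_index : Int) : List String × List String × Int :=
  if items.isEmpty then ([], [], start_index)
  else
    let td := PySem.Dict.ofList text_to_sources
    let st := passB td start_index items ([], PySem.Dict.ofList source_key_to_note_index)
    ((items.map fun item => fmtItem (st.2.getD (td.getD item []) 0) item),
     (PySem.List.enumerate st.1 0).map (fun p => noteLine (start_index + p.1) p.2),
     start_index + (st.1.length : Int))

-- ===== PRECONDITION & SPEC =====
def Spec_citation_suffixes (items : List String) (text_to_sources : List (String × List String)) (source_key_to_note_index : List (List String × Int)) (start_index : Int) (out : List String × List String × Int) : Prop := out = citation_suffixes_alt items text_to_sources source_key_to_note_index start_index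
instance (items : List String) (text_to_sources : List (String × List String)) (source_key_to_note_index : List (List String × Int)) (start_index : Int) (out : List String × List String × Int) : Decidable (Spec_citation_suffixes items text_to_sources source_key_to_note_index start_index out) := by unfold Spec_citation_suffixes; infer_instance

-- ===== CLAIM =====
def Claim_equal_citation_suffixes : Prop := ∀ (items : List String) (text_to_sources : List (String × List String)) (source_key_to_note_index : List (List String × Int)) (start_index : Int), Dom_citation_suffixes items text_to_sources source_key_to_note_index start_index → Spec_citation_suffixes items text_to_sources source_key_to_note_index start_index (citation_suffixes items text_to_sources source_key_to_note_index start_index)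

-- ===== LEMMAS AND PROOFS =====

-- proof-only helper: the notes A appends while the new-key list grows from position i
def buildNotes (i : Int) : List (List String) → List String
  | [] => []
  | k :: ks => noteLine i k :: buildNotes (i + 1) ks

theorem enumerate_map_eq_buildNotes (start : Int) (ks : List (List String)) (s : Int) :
    (PySem.List.enumerate ks s).map (fun p => noteLine (start + p.1) p.2) =
      buildNotes (start + s) ks := by
  induction ks generalizing s with
  | nil => simp [PySem.List.enumerate_nil, buildNotes]
  | cons k rest ih =>
    rw [PySem.List.enumerate_cons]
    simp only [List.map_cons, buildNotes, ih]
    ring_nf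

-- passB only appends to the new-key list
theorem passB_fst_prefix (td : PySem.Dict String (List String)) (start : Int)
    (l : List String) (nk : List (List String)) (d : PySem.Dict (List String) Int) :
    ∃ tl, (passB td start l (nk, d)).1 = nk ++ tl := by
  induction l generalizing nk d with
  | nil => exact ⟨[], by simp [passB]⟩
  | cons item rest ih =>
    by_cases hc : d.contains (td.getD item []) = true
    · simpa [passB, hc] using ih nk d
    · obtain ⟨tl, htl⟩ := ih (nk ++ [td.getD item []]) (d.insert (td.getD item []) (start + (nk.length : Int)))
      exact ⟨td.getD item [] :: tl, by simp [passB, hc, htl]⟩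

-- passB never overwrites: existing bindings survive to the end
theorem passB_mono (td : PySem.Dict String (List String)) (start : Int)
    (l : List String) (nk : List (List String)) (d : PySem.Dict (List String) Int)
    (k : List String) (v : Int) (h : d.get? k = some v) :
    ((passB td start l (nk, d)).2).get? k = some v := by
  induction l generalizing nk d with
  | nil => simpa [passB] using h
  | cons item rest ih =>
    by_cases hc : d.contains (td.getD item []) = true
    · simpa [passB, hc] using ih nk d h
    · have hne : k ≠ td.getD item [] := by
        intro hk
        rw [PySem.Dict.contains_eq_isSome_get?] at hc
        rw [hk] at h; simp [h] at hc
      simp only [passB, hc, Bool.false_eq_true, ite_false]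
      exact ih _ _ (by rw [PySem.Dict.get?_insert_of_ne _ _ hne]; exact h)

-- A's fused loop = B's collection pass + index arithmetic + rendering from the final mapping
theorem loopA_eq_passB (td : PySem.Dict String (List String)) (start : Int) (l : List String) :
    ∀ (rendered notes : List String) (d : PySem.Dict (List String) Int) (nk : List (List String)),
    loopA td l (rendered, notes, d, start + (nk.length : Int)) =
      (rendered ++ (l.map fun item =>
          fmtItem ((passB td start l (nk, d)).2.getD (td.getD item []) 0) item),
       notes ++ buildNotes (start + (nk.length : Int)) ((passB td start l (nk, d)).1.drop nk.length),
       (passB td start l (nk, d)).2,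
       start + (((passB td start l (nk, d)).1.length : Nat) : Int)) := by
  induction l with
  | nil => intro rendered notes d nk; simp [loopA, passB, buildNotes]
  | cons item rest ih =>
    intro rendered notes d nk
    rcases hg : d.get? (td.getD item []) with _ | ni
    · -- new key
      have hc : d.contains (td.getD item []) = false := by
        rw [PySem.Dict.contains_eq_isSome_get?, hg]; rfl
      have hfin : ((passB td start rest (nk ++ [td.getD item []],
          d.insert (td.getD item []) (start + (nk.length : Int)))).2).get? (td.getD item [])
          = some (start + (nk.length : Int)) :=
        passB_mono td start rest _ _ _ _ (PySem.Dict.get?_insert_self _ _ _)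
      obtain ⟨tl, htl⟩ := passB_fst_prefix td start rest
        (nk ++ [td.getD item []]) (d.insert (td.getD item []) (start + (nk.length : Int)))
      have hnext : start + (nk.length : Int) + 1 = start + (((nk ++ [td.getD item []]).length : Nat) : Int) := by
        simp; ring
      simp only [loopA, passB, hg, hc, Bool.false_eq_true, ite_false]
      rw [hnext, ih]
      rw [htl]
      simp [PySem.Dict.getD_of_get?_eq_some _ 0 hfin, fmtItem, buildNotes]
      congr 1
      ring
    · -- key already present
      have hc : d.contains (td.getD item []) = true := by
        rw [PySem.Dict.contains_eq_isSome_get?, hg]; rfl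
      have hfin : ((passB td start rest (nk, d)).2).get? (td.getD item []) = some ni :=
        passB_mono td start rest _ _ _ _ hg
      simp only [loopA, passB, hg, hc, ite_true]
      rw [ih]
      simp [PySem.Dict.getD_of_get?_eq_some _ 0 hfin, fmtItem]

-- ===== VERDICT =====
theorem citation_suffixes_spec : Claim_equal_citation_suffixes := by
  intro items t2s sk si _
  unfold Spec_citation_suffixes citation_suffixes citation_suffixes_alt
  by_cases h : items.isEmpty
  · simp [h]
  · simp only [h, ite_false, Bool.false_eq_true]
    have := loopA_eq_passB (PySem.Dict.ofList t2s) si items [] []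
      (PySem.Dict.ofList sk) []
    rw [show si = si + (([] : List (List String)).length : Int) by simp, this]
    simp [enumerate_map_eq_buildNotes]
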